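-- pv_equiv track=rewrite | github.com/renesugar/html2txt | html2txt/parsers/etreehtmlparser.py | escape_attribute_characters
-- ===== SOURCE A (Python) =====
-- def escape_attribute_characters(s):
--   result = ''
--   in_quote = False
--   quote_char = None
--   for c in s:
--     if in_quote == True and c == quote_char:
--       in_quote = False
--     elif c == '"' or c == "'":
--       if in_quote == False:
--         in_quote = True
--         quote_char = c
--     if c == '<' and in_quote == True:
--       c = '&lt;'
--     elif c == '>' and in_quote == True:
--       c = '&gt;'
--     elif c == '&' and in_quote == True:
--       c = '&amp;'
--     result += c
--   return result
-- ===== SOURCE B (Python) =====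
-- _ESC = {'&': '&amp;', '<': '&lt;', '>': '&gt;'}
--
-- def _escape(t):
--     return ''.join(_ESC.get(c, c) for c in t)
--
-- def escape_attribute_characters(s):
--     out = []
--     rest = s
--     while rest:
--         c, rest = rest[0], rest[1:]
--         if c == '"' or c == "'":
--             body, sep, rest = rest.partition(c)
--             out.append(c + _escape(body) + sep)
--         else:
--             out.append(c)
--     return ''.join(out)
-- ===== Notes on version B (the rewrite author's own statement) =====
-- stated objective: simpler
-- what changed: Replaced the char-by-char in_quote/quote_char state machine with a span scanner: copy text up to a quote verbatim, split off the quoted body with str.partition on the same quote char, and escape that body via a translation table.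
import Mathlib
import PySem

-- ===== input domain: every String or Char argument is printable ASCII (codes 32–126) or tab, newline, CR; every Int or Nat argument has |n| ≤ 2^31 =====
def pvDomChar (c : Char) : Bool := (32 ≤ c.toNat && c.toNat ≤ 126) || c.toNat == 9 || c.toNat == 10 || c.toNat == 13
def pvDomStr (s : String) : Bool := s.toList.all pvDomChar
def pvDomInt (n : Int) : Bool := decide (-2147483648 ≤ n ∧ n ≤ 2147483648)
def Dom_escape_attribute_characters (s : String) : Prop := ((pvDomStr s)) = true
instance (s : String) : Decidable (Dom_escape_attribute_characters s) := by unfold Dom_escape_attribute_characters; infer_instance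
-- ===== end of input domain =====

-- B is a span scanner (partition on the quote char + table escape) instead of A's
-- per-character in_quote/quote_char state machine; objective: simpler. Return values agree on all inputs.

-- ===== PORT A =====
-- A's loop, transliterated: state (in_quote, quote_char), each char appended (escaped if in quote).
def escA (inq : Bool) (qc : Option Char) : List Char → List Char
  | [] => []
  | c :: cs =>
    let st : Bool × Option Char :=
      if inq = true ∧ some c = qc then (false, qc)
      else if c = '"' ∨ c = '\'' then
        (if inq = false then (true, some c) else (inq, qc))
      else (inq, qc)
    let cc : List Char :=
      if c = '<' ∧ st.1 = true then "&lt;".toList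
      else if c = '>' ∧ st.1 = true then "&gt;".toList
      else if c = '&' ∧ st.1 = true then "&amp;".toList
      else [c]
    cc ++ escA st.1 st.2 cs

def escape_attribute_characters (s : String) : String :=
  String.mk (escA false none s.toList)

-- ===== PORT B =====
-- _ESC.get(c, c): the three-entry translation table
def escD (c : Char) : List Char :=
  if c = '&' then "&amp;".toList
  else if c = '<' then "&lt;".toList
  else if c = '>' then "&gt;".toList
  else [c]

-- _escape(t) = ''.join(_ESC.get(c, c) for c in t)
def escTxt (t : List Char) : List Char := t.flatMap escD

-- the while-loop: on a quote char, partition the rest at the same quote char and escape the body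
def escB : List Char → List Char
  | [] => []
  | c :: rest =>
    if c = '"' ∨ c = '\'' then
      let body := rest.takeWhile (· ≠ c)
      match h : rest.dropWhile (· ≠ c) with
      | [] => c :: escTxt body                                -- no closing quote: sep = ''
      | _ :: tail => (c :: escTxt body ++ [c]) ++ escB tail   -- body, quote, continue after it
    else c :: escB rest
  termination_by l => l.length
  decreasing_by
    · have h2 : (rest.dropWhile (fun x => decide (x ≠ c))).length ≤ rest.length :=
        List.length_dropWhile_le _ _
      rw [h] at h2
      simp at h2 ⊢
      omega
    · simp

def escape_attribute_characters_alt (s : String) : String :=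
  String.mk (escB s.toList)

-- ===== PRECONDITION & SPEC =====
def Spec_escape_attribute_characters (s : String) (out : String) : Prop := out = escape_attribute_characters_alt s
instance (s : String) (out : String) : Decidable (Spec_escape_attribute_characters s out) := by unfold Spec_escape_attribute_characters; infer_instance

-- ===== CLAIM (what is proved, stated in full; the proofs are below) =====
def Claim_equal_escape_attribute_characters : Prop := ∀ (s : String), Dom_escape_attribute_characters s → Spec_escape_attribute_characters s (escape_attribute_characters s)

-- ===== LEMMAS AND PROOFS =====

-- inside a quote opened by q, A escapes each char until it meets q again
theorem escA_inq (q : Char) (l : List Char) :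
    escA true (some q) l =
      escTxt (l.takeWhile (· ≠ q)) ++
        (match l.dropWhile (· ≠ q) with
         | [] => []
         | _ :: tail => q :: escA false (some q) tail) := by
  induction l with
  | nil => simp [escA, escTxt]
  | cons d ds ih =>
    by_cases hd : d = q
    · subst hd
      simp [escA, escTxt]
    · have ht : (d :: ds).takeWhile (· ≠ q) = d :: ds.takeWhile (· ≠ q) := by
        simp [List.takeWhile, hd]
      have hdw : (d :: ds).dropWhile (· ≠ q) = ds.dropWhile (· ≠ q) := by
        simp [List.dropWhile, hd]
      rw [ht, hdw]
      have hstep : escA true (some q) (d :: ds) = escD d ++ escA true (some q) ds := by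
        have hne : ¬ (true = true ∧ some d = some q) := by simp [hd]
        simp only [escA, if_neg hne]
        by_cases hq : d = '"' ∨ d = '\''
        · rcases hq with h | h <;> subst h <;> simp [escD, hd]
        · simp only [if_neg hq]
          by_cases h1 : d = '<' <;> by_cases h2 : d = '>' <;> by_cases h3 : d = '&' <;>
            simp_all [escD]
      rw [hstep, ih, escTxt, escTxt, List.flatMap_cons, List.append_assoc]

-- outside a quote, the stale quote_char is irrelevant and A coincides with B
theorem escA_eq_escB (l : List Char) (qc : Option Char) :
    escA false qc l = escB l := by
  induction hn : l.length using Nat.strong_induction_on generalizing l qc with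
  | _ n ih =>
  match l with
  | [] => simp [escA, escB]
  | c :: rest =>
    by_cases hq : c = '"' ∨ c = '\''
    · have hcne : c ≠ '<' ∧ c ≠ '>' ∧ c ≠ '&' := by
        rcases hq with h | h <;> simp [h]
      have hstep : escA false qc (c :: rest) = c :: escA true (some c) rest := by
        simp [escA, hq, hcne]
      rw [hstep, escA_inq]
      rw [escB]
      simp only [hq, if_true]
      cases hdw : rest.dropWhile (· ≠ c) with
      | nil => simp
      | cons x tail =>
        have htail : tail.length < n := by
          have := rest.length_dropWhile_le (p := (· ≠ c))
          rw [hdw] at this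
          simp at this
          subst hn; simp; omega
        simp only [List.append_assoc]
        rw [ih tail.length htail tail (some c) rfl]
        simp
    · have hstep : escA false qc (c :: rest) = c :: escA false qc rest := by
        by_cases hm : some c = qc
        · simp [escA, hm, hq]
        · simp [escA, hm, hq]
      have hrest : rest.length < n := by subst hn; simp
      rw [hstep, ih rest.length hrest rest qc rfl]
      rw [escB]
      simp [hq]

-- ===== VERDICT (by name: the statement is the Claim_ definition above) =====
theorem escape_attribute_characters_spec : Claim_equal_escape_attribute_characters := by
  intro s _
  unfold Spec_escape_attribute_characters escape_attribute_characters escape_attribute_characters_alt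
  rw [escA_eq_escB]
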